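-- pv_equiv track=rewrite | github.com/aabbcco/mathmatics2020 | T4/code/probelm4.py | timestamp
-- ===== SOURCE A (Python) =====
-- def timestamp(h,m,s,gap,num):
--     for i in range(num):
--         s = s+1 if i%2 == 0 else s
--         s+=gap
--         m+=int(s/60)
--         h+=int(m/60)
--         s = s%60
--         m = m%60
--     return "2016-04-14 %s:%s:%s"%(
--         str(h) if h>=10 else '0'+str(h),
--         str(m) if m>=10 else '0'+str(m),
--         str(s) if s>=10 else '0'+str(s),
--         )
-- ===== SOURCE B (Python) =====
-- def _step(h, m, s, gap, even):
--     # one clock step: the transition both implementations must share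
--     s = s + 1 if even else s
--     s += gap
--     m += int(s / 60)
--     h += int(m / 60)
--     s %= 60
--     m %= 60
--     return h, m, s
--
--
-- def timestamp(h, m, s, gap, num):
--     # Instead of simulating all num steps, detect the first repeat of the finite
--     # (parity, m, s) state; h changes only additively, so jump over all whole
--     # periods at once and simulate only the short remainder.
--     seen = {}
--     i = 0
--     while i < num:
--         key = (i % 2, m, s)
--         if key in seen:
--             j, hj = seen[key]
--             cycles = (num - i) // (i - j)
--             h += cycles * (h - hj)
--             i += cycles * (i - j)
--             break
--         seen[key] = (i, h)
--         h, m, s = _step(h, m, s, gap, i % 2 == 0)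
--         i += 1
--     while i < num:
--         h, m, s = _step(h, m, s, gap, i % 2 == 0)
--         i += 1
--     return "2016-04-14 %s:%s:%s" % (
--         str(h) if h >= 10 else '0' + str(h),
--         str(m) if m >= 10 else '0' + str(m),
--         str(s) if s >= 10 else '0' + str(s),
--     )
-- ===== Notes on version B (the rewrite author's own statement) =====
-- stated objective: faster
-- what changed: Instead of simulating all num steps, B detects the first repeat of the finite (parity, minutes, seconds) state, uses that h changes only additively to jump over all whole periods at once, and simulates only the short remainder.
import Mathlib
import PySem

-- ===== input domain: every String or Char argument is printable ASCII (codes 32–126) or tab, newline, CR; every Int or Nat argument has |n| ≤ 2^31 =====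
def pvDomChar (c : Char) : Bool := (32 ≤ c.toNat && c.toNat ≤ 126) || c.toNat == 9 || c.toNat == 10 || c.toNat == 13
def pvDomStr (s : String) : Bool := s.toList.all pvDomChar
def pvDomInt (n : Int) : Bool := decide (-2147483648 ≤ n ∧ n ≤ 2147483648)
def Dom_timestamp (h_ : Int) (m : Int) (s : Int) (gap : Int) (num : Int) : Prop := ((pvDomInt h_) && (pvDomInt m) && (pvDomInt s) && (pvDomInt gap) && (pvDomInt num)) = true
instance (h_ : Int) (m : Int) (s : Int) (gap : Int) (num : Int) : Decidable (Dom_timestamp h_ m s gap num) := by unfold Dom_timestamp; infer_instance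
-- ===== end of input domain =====

-- B replaces A's step-by-step simulation of all num steps by cycle detection on the
-- finite (parity, m, s) state with a single jump over whole periods (objective: faster).

-- ===== PORT A =====
-- the loop body, textually identical in Source A and Source B (int(x/60) is exact truncating
-- division on the |n| ≤ 2^31 domain, ported as PySem.Int.truncdiv)
def pvStep (gap : Int) (even : Bool) (st : Int × Int × Int) : Int × Int × Int :=
  let s1 := if even then st.2.2 + 1 else st.2.2
  let s2 := s1 + gap
  let m1 := st.2.1 + PySem.Int.truncdiv s2 60
  let h1 := st.1 + PySem.Int.truncdiv m1 60
  (h1, PySem.Int.mod m1 60, PySem.Int.mod s2 60)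

-- str(x) if x >= 10 else '0' + str(x)  (shared by the format strings of both Pythons)
def pvFmt (x : Int) : String :=
  if x ≥ 10 then PySem.Int.toStr x else "0" ++ PySem.Int.toStr x

def timestamp (h_ : Int) (m : Int) (s : Int) (gap : Int) (num : Int) : String :=
  let st := (PySem.List.pyRange 0 num 1).foldl
    (fun st i => pvStep gap (PySem.Int.mod i 2 == 0) st) (h_, m, s)
  "2016-04-14 " ++ pvFmt st.1 ++ ":" ++ pvFmt st.2.1 ++ ":" ++ pvFmt st.2.2

-- ===== PORT B =====
-- first while loop of Source B: simulate, memoising (i % 2, m, s) ↦ (i, h); on a repeat of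
-- the state, jump over all whole periods at once and stop; returns (i, (h, m, s))
def pvPhase1 (gap : Int) (num : Int) (seen : PySem.Dict (Int × Int × Int) (Int × Int))
    (i : Int) (st : Int × Int × Int) : Int × (Int × Int × Int) :=
  if h : i < num then
    match seen.get? (PySem.Int.mod i 2, st.2.1, st.2.2) with
    | some (j, hj) =>
        (i + PySem.Int.floordiv (num - i) (i - j) * (i - j),
         (st.1 + PySem.Int.floordiv (num - i) (i - j) * (st.1 - hj), st.2.1, st.2.2))
    | none =>
        pvPhase1 gap num (seen.insert (PySem.Int.mod i 2, st.2.1, st.2.2) (i, st.1))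
          (i + 1) (pvStep gap (PySem.Int.mod i 2 == 0) st)
  else (i, st)
termination_by (num - i).toNat
decreasing_by omega

-- second while loop of Source B: plain simulation of the remaining steps
def pvPhase2 (gap : Int) (num : Int) (i : Int) (st : Int × Int × Int) : Int × Int × Int :=
  if h : i < num then pvPhase2 gap num (i + 1) (pvStep gap (PySem.Int.mod i 2 == 0) st)
  else st
termination_by (num - i).toNat
decreasing_by omega

def timestamp_alt (h_ : Int) (m : Int) (s : Int) (gap : Int) (num : Int) : String :=
  let r := pvPhase1 gap num PySem.Dict.empty 0 (h_, m, s)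
  let st := pvPhase2 gap num r.1 r.2
  "2016-04-14 " ++ pvFmt st.1 ++ ":" ++ pvFmt st.2.1 ++ ":" ++ pvFmt st.2.2

-- ===== PRECONDITION & SPEC =====
def Spec_timestamp (h_ : Int) (m : Int) (s : Int) (gap : Int) (num : Int) (out : String) : Prop := out = timestamp_alt h_ m s gap num
instance (h_ : Int) (m : Int) (s : Int) (gap : Int) (num : Int) (out : String) : Decidable (Spec_timestamp h_ m s gap num out) := by unfold Spec_timestamp; infer_instance

-- ===== CLAIM (what is proved, stated in full; the proofs are below) =====
def Claim_equal_timestamp : Prop := ∀ (h_ : Int) (m : Int) (s : Int) (gap : Int) (num : Int), Dom_timestamp h_ m s gap num → Spec_timestamp h_ m s gap num (timestamp h_ m s gap num)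

-- ===== LEMMAS AND PROOFS =====

-- reference semantics: n steps from state st, current step's parity flag ev
def runP (gap : Int) : Nat → Bool → (Int × Int × Int) → (Int × Int × Int)
  | 0, _, st => st
  | n + 1, ev, st => runP gap n (!ev) (pvStep gap ev st)

-- parity flag after n steps
def pvParity : Nat → Bool → Bool
  | 0, ev => ev
  | n + 1, ev => pvParity n (!ev)

theorem pvParity_eq (n : Nat) (ev : Bool) : pvParity n ev = if n % 2 = 0 then ev else !ev := by
  induction n generalizing ev with
  | zero => rfl
  | succ k ih =>
    rw [pvParity, ih]
    by_cases hk : k % 2 = 0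
    · have h2 : ¬ ((k + 1) % 2 = 0) := by omega
      simp [hk, h2]
    · have h2 : (k + 1) % 2 = 0 := by omega
      simp [hk, h2]

theorem parity_flip (a : Int) :
    (PySem.Int.mod (a + 1) 2 == 0) = !(PySem.Int.mod a 2 == 0) := by
  rw [PySem.Int.mod_eq_emod_of_pos (by norm_num), PySem.Int.mod_eq_emod_of_pos (by norm_num)]
  by_cases h : a % 2 = 0
  · have h2 : (a + 1) % 2 = 1 := by omega
    simp [h, h2]
  · have h1 : a % 2 = 1 := by omega
    have h2 : (a + 1) % 2 = 0 := by omega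
    simp [h1, h2]

theorem parity_int (i : Int) (hi : 0 ≤ i) :
    (PySem.Int.mod i 2 == 0) = pvParity i.toNat true := by
  rw [PySem.Int.mod_eq_emod_of_pos (by norm_num), pvParity_eq]
  have h : i % 2 = 0 ↔ i.toNat % 2 = 0 := by omega
  by_cases hc : i % 2 = 0
  · simp [hc, h.mp hc]
  · have : ¬ (i.toNat % 2 = 0) := fun hh => hc (h.mpr hh)
    simp [hc, this]

theorem foldA (gap : Int) (n : Nat) : ∀ (a : Int) (st : Int × Int × Int),
    (PySem.List.pyRange a (a + n) 1).foldl
      (fun st i => pvStep gap (PySem.Int.mod i 2 == 0) st) st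
    = runP gap n (PySem.Int.mod a 2 == 0) st := by
  induction n with
  | zero =>
    intro a st
    rw [show a + ((0:Nat):Int) = a by push_cast; ring, PySem.List.pyRange_one_eq_nil le_rfl]
    rfl
  | succ k ih =>
    intro a st
    rw [PySem.List.pyRange_one_cons (by push_cast; omega : a < a + ((k+1:Nat):Int))]
    rw [List.foldl_cons]
    have harg : a + ((k+1:Nat):Int) = (a + 1) + (k:Nat) := by push_cast; ring
    rw [harg, ih (a+1), parity_flip, runP]

theorem pvStep_shift (gap : Int) (ev : Bool) (h c m s : Int) :
    pvStep gap ev (h + c, m, s) = ((pvStep gap ev (h, m, s)).1 + c, (pvStep gap ev (h, m, s)).2) := by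
  simp only [pvStep]
  refine Prod.ext ?_ rfl
  simp only []
  ring

theorem runP_shift (gap : Int) (n : Nat) : ∀ (ev : Bool) (h c m s : Int),
    runP gap n ev (h + c, m, s)
    = ((runP gap n ev (h, m, s)).1 + c, (runP gap n ev (h, m, s)).2) := by
  induction n with
  | zero => intro ev h c m s; rfl
  | succ k ih =>
    intro ev h c m s
    rw [runP, runP, pvStep_shift]
    rcases hps : pvStep gap ev (h, m, s) with ⟨H, M, S⟩
    exact ih (!ev) H c M S

theorem runP_add (gap : Int) (a : Nat) : ∀ (b : Nat) (ev : Bool) (st : Int × Int × Int),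
    runP gap (a + b) ev st = runP gap b (pvParity a ev) (runP gap a ev st) := by
  induction a with
  | zero => intro b ev st; rw [Nat.zero_add]; rfl
  | succ k ih =>
    intro b ev st
    rw [Nat.succ_add]
    exact ih b (!ev) (pvStep gap ev st)

theorem runP_snoc (gap : Int) (n : Nat) (ev : Bool) (st : Int × Int × Int) :
    runP gap (n + 1) ev st = pvStep gap (pvParity n ev) (runP gap n ev st) := by
  rw [runP_add gap n 1 ev st]; rfl

theorem runP_period (gap : Int) (p : Nat) (hp : p % 2 = 0) (ev : Bool) (m s d : Int)
    (hper : runP gap p ev (0, m, s) = (d, m, s)) :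
    ∀ (k : Nat) (h : Int), runP gap (k * p) ev (h, m, s) = (h + k * d, m, s) := by
  intro k
  induction k with
  | zero => intro h; simp [runP]
  | succ j ih =>
    intro h
    have hmul : (j + 1) * p = p + j * p := by ring
    rw [hmul, runP_add gap p (j * p) ev (h, m, s)]
    have hpar : pvParity p ev = ev := by rw [pvParity_eq, if_pos hp]
    have hrp : runP gap p ev (h, m, s) = (d + h, m, s) := by
      have := runP_shift gap p ev 0 h m s
      rw [zero_add] at this
      rw [this, hper]
    rw [hpar, hrp, ih (d + h)]
    refine Prod.ext ?_ rfl
    push_cast; ring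

theorem step_next (gap h0 m0 s0 : Int) (i : Int) (hi : 0 ≤ i) (st : Int × Int × Int)
    (hst : st = runP gap i.toNat true (h0, m0, s0)) :
    pvStep gap (PySem.Int.mod i 2 == 0) st = runP gap (i + 1).toNat true (h0, m0, s0) := by
  have h1 : (i + 1).toNat = i.toNat + 1 := by omega
  rw [h1, runP_snoc, ← hst, parity_int i hi]

theorem phase2_runs (gap num h0 m0 s0 : Int) : ∀ (i : Int) (st : Int × Int × Int),
    0 ≤ i → i ≤ num → st = runP gap i.toNat true (h0, m0, s0) →
    pvPhase2 gap num i st = runP gap num.toNat true (h0, m0, s0) := by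
  intro i st
  fun_induction pvPhase2 gap num i st with
  | case1 i st hlt ih =>
    intro h0i hin hst
    exact ih (by omega) (by omega) (step_next gap h0 m0 s0 i h0i st hst)
  | case2 i st hlt =>
    intro h0i hin hst
    have : i = num := by omega
    rw [hst, this]

-- invariant carried by pvPhase1's memo dictionary
def pvInv (gap h0 m0 s0 : Int) (seen : PySem.Dict (Int × Int × Int) (Int × Int)) (i : Int) : Prop :=
  ∀ k j hj, seen.get? k = some (j, hj) →
    0 ≤ j ∧ j < i ∧ k.1 = PySem.Int.mod j 2 ∧
    runP gap j.toNat true (h0, m0, s0) = (hj, k.2.1, k.2.2)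

theorem phase1_correct (gap num h0 m0 s0 : Int) : ∀ (i : Int) (st : Int × Int × Int) seen,
    0 ≤ i → i ≤ num → st = runP gap i.toNat true (h0, m0, s0) → pvInv gap h0 m0 s0 seen i →
    0 ≤ (pvPhase1 gap num seen i st).1 ∧ (pvPhase1 gap num seen i st).1 ≤ num ∧
    (pvPhase1 gap num seen i st).2 = runP gap (pvPhase1 gap num seen i st).1.toNat true (h0, m0, s0) := by
  intro i st seen
  fun_induction pvPhase1 gap num seen i st with
  | case1 seen i st hlt j hj hget =>
    intro h0i hin hst hinv
    obtain ⟨hj0, hji, hpar, hrunj⟩ := hinv _ j hj hget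
    simp only at hpar hrunj
    dsimp only
    set p : Int := i - j with hpdef
    set cycles : Int := PySem.Int.floordiv (num - i) p with hcdef
    have hppos : 0 < p := by omega
    have hc0 : 0 ≤ cycles := by
      have := (PySem.Int.le_floordiv_iff_mul_le (a := num - i) (b := p) (q := 0) hppos).mpr (by omega)
      omega
    have hcle : cycles * p ≤ num - i :=
      (PySem.Int.le_floordiv_iff_mul_le (a := num - i) (b := p) (q := cycles) hppos).mp le_rfl
    have hcpnn : 0 ≤ cycles * p := mul_nonneg hc0 (by omega)
    refine ⟨by omega, by omega, ?_⟩
    set pn : Nat := p.toNat with hpn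
    set c : Nat := cycles.toNat with hcn
    have hito : i.toNat = j.toNat + pn := by omega
    have hmodi : i % 2 = j % 2 := by
      have h1 := PySem.Int.mod_eq_emod_of_pos (a := i) (b := 2) (by norm_num)
      have h2 := PySem.Int.mod_eq_emod_of_pos (a := j) (b := 2) (by norm_num)
      rw [h1, h2] at hpar; omega
    have hpeven : pn % 2 = 0 := by omega
    set evj : Bool := pvParity j.toNat true with hevj
    have hparsame : pvParity i.toNat true = evj := by
      rw [hevj, pvParity_eq, pvParity_eq]
      have : i.toNat % 2 = j.toNat % 2 := by omega
      rw [this]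
    have hcyc : runP gap pn evj (hj, st.2.1, st.2.2) = (st.1, st.2.1, st.2.2) := by
      have h1 := runP_add gap j.toNat pn true (h0, m0, s0)
      rw [hrunj] at h1
      rw [← h1, ← hito, ← hst]
    have hper0 : runP gap pn evj (0, st.2.1, st.2.2) = (st.1 - hj, st.2.1, st.2.2) := by
      have h2 := runP_shift gap pn evj 0 hj st.2.1 st.2.2
      rw [zero_add, hcyc] at h2
      rcases hX : runP gap pn evj (0, st.2.1, st.2.2) with ⟨X1, X2, X3⟩
      rw [hX] at h2
      simp only [Prod.mk.injEq] at h2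
      obtain ⟨e1, e2, e3⟩ := h2
      simp only [Prod.mk.injEq]
      exact ⟨by omega, e2.symm, e3.symm⟩
    have hjump := runP_period gap pn hpeven evj st.2.1 st.2.2 (st.1 - hj) hper0 c st.1
    have hcastp : cycles * p = ((c * pn : Nat) : Int) := by
      push_cast
      rw [hcn, hpn, Int.toNat_of_nonneg hc0, Int.toNat_of_nonneg (by omega : (0:Int) ≤ p)]
    have htn : (i + cycles * p).toNat = i.toNat + c * pn := by
      rw [hcastp]; omega
    rw [htn, runP_add gap i.toNat (c * pn) true (h0, m0, s0), ← hst, hparsame]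
    have hcyceq : cycles = (c : Int) := (Int.toNat_of_nonneg hc0).symm
    rw [hcyceq]
    exact hjump.symm
  | case2 seen i st hlt hget ih =>
    intro h0i hin hst hinv
    apply ih (by omega) (by omega) (step_next gap h0 m0 s0 i h0i st hst)
    intro k j hj hget'
    rw [PySem.Dict.get?_insert] at hget'
    by_cases hk : k = (PySem.Int.mod i 2, st.2.1, st.2.2)
    · rw [if_pos hk] at hget'
      injection hget' with h
      injection h with ha hb
      subst hk
      refine ⟨by omega, by omega, by rw [← ha], ?_⟩
      rw [← ha, ← hst, ← hb]
    · rw [if_neg hk] at hget'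
      obtain ⟨a1, a2, a3, a4⟩ := hinv k j hj hget'
      exact ⟨a1, by omega, a3, a4⟩
  | case3 seen i st hlt =>
    intro h0i hin hst hinv
    exact ⟨h0i, by omega, hst⟩

theorem main_eq (h_ m s gap num : Int) : timestamp h_ m s gap num = timestamp_alt h_ m s gap num := by
  by_cases hn : 0 ≤ num
  · have hrange : PySem.List.pyRange 0 num 1 = PySem.List.pyRange 0 (0 + (num.toNat : Int)) 1 := by
      congr 1; omega
    have hAst : (PySem.List.pyRange 0 num 1).foldl
        (fun st i => pvStep gap (PySem.Int.mod i 2 == 0) st) (h_, m, s)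
        = runP gap num.toNat true (h_, m, s) := by
      rw [hrange, foldA]
      norm_num [PySem.Int.mod]
    obtain ⟨b1, b2, b3⟩ := phase1_correct gap num h_ m s 0 (h_, m, s) PySem.Dict.empty
      (le_refl 0) hn rfl
      (by intro k j hj hg; rw [PySem.Dict.get?_empty] at hg; cases hg)
    have hBst := phase2_runs gap num h_ m s _ _ b1 b2 b3
    simp only [timestamp, timestamp_alt]
    rw [hAst, hBst]
  · have h1 : pvPhase1 gap num PySem.Dict.empty 0 (h_, m, s) = (0, (h_, m, s)) := by
      rw [pvPhase1, dif_neg (by omega : ¬ (0:Int) < num)]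
    have h2 : pvPhase2 gap num 0 (h_, m, s) = (h_, m, s) := by
      rw [pvPhase2, dif_neg (by omega : ¬ (0:Int) < num)]
    simp only [timestamp, timestamp_alt, h1, h2,
      PySem.List.pyRange_one_eq_nil (by omega : num ≤ (0:Int)), List.foldl_nil]

-- ===== VERDICT (by name: the statement is the Claim_ definition above) =====
theorem timestamp_spec : Claim_equal_timestamp := by
  intro h_ m s gap num _
  show _ = _
  exact main_eq h_ m s gap num
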